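-- pv_equiv track=rewrite | github.com/KohlJary/project-cass | backend/wiki/parser.py | add_link
-- ===== SOURCE A (Python) =====
-- def add_link(content: str, target: str,
--              position: str = "end",
--              section: str = "Related") -> str:
--     """
--     Add a wikilink to the content.
--
--     Args:
--         content: Existing markdown content
--         target: Page to link to
--         position: Where to add - "end" appends, "related" adds to Related section
--         section: Section name to add link under (if position="related")
--
--     Returns:
--         Updated content with new link
--     """
--     link = f"[[{target}]]"
--
--     if position == "end":
--         return content.rstrip() + f"\n\n{link}\n"
--
--     # Try to find or create a section for related links
--     section_header = f"## {section}"
--     if section_header in content: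
--         # Add to existing section
--         lines = content.split('\n')
--         result = []
--         in_section = False
--         added = False
--
--         for i, line in enumerate(lines):
--             result.append(line)
--             if line.strip() == section_header:
--                 in_section = True
--             elif in_section and not added:
--                 # Add after first blank line or list item in section
--                 if line.strip() == "" or line.startswith("- "):
--                     if line.strip() == "":
--                         result.append(f"- {link}")
--                     else:
--                         result.append(f"- {link}")
--                     added = True
--                     in_section = False
--
--         if not added:
--             result.append(f"\n- {link}")
--
--         return '\n'.join(result)
--     else:
--         # Create new section at end
--         return content.rstrip() + f"\n\n{section_header}\n\n- {link}\n"
-- ===== SOURCE B (Python) =====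
-- def add_link(content: str, target: str,
--              position: str = "end",
--              section: str = "Related") -> str:
--     link = f"[[{target}]]"
--
--     if position == "end":
--         return content.rstrip() + f"\n\n{link}\n"
--
--     section_header = f"## {section}"
--     if section_header not in content:
--         # Create new section at end
--         return content.rstrip() + f"\n\n{section_header}\n\n- {link}\n"
--
--     lines = content.split('\n')
--     # Index of the first line that is exactly the header (stripped).
--     idx = next((i for i, ln in enumerate(lines) if ln.strip() == section_header), None)
--     if idx is None:
--         return '\n'.join(lines) + f"\n\n- {link}"
--     # First blank line or list item after the header.
--     off = next((k for k, ln in enumerate(lines[idx + 1:])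
--                 if ln.strip() == "" or ln.startswith("- ")), None)
--     if off is None:
--         return '\n'.join(lines) + f"\n\n- {link}"
--     j = idx + 1 + off
--     return '\n'.join(lines[:j + 1] + [f"- {link}"] + lines[j + 1:])
-- ===== Notes on version B (the rewrite author's own statement) =====
-- stated objective: simpler
-- what changed: The existing-section case is rewritten as two explicit index searches (first line whose strip() equals the header, then the first blank or '- ' line after it) followed by a single slice insertion, replacing A's one-pass accumulator loop with in_section/added flags.
import Mathlib
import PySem

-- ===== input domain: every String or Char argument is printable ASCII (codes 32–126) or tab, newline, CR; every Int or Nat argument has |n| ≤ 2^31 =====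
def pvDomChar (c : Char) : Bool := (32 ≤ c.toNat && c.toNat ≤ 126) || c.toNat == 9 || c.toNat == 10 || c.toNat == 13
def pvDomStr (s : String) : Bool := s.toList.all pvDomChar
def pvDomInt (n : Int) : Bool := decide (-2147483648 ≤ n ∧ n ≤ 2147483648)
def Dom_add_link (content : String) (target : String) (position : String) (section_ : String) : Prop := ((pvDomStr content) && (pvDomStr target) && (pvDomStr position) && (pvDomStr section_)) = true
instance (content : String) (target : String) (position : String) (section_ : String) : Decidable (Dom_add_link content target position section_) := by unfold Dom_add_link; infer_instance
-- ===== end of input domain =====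

-- B rewrites the existing-section case as find-header-index + scan-forward + slice insertion instead of
-- A's three-flag accumulating pass; same return value everywhere (objective: simpler decomposition).

-- content.split('\n') (both Pythons call it)
def pvSplitNL (content : String) : List String :=
  (PySem.Chars.splitOn content.toList ['\n']).map String.ofList

-- ===== PORT A =====
-- the body of A's for-loop: state = (result, in_section, added)
def pvStepA (header link : String) (st : List String × Bool × Bool) (line : String) :
    List String × Bool × Bool :=
  let result := st.1 ++ [line]
  if PySem.Str.strip line == header then
    (result, true, st.2.2)
  else if st.2.1 && !st.2.2 then
    if PySem.Str.strip line == "" || PySem.Str.startswith line "- " then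
      if PySem.Str.strip line == "" then (result ++ ["- " ++ link], false, true)
      else (result ++ ["- " ++ link], false, true)
    else (result, st.2.1, st.2.2)
  else (result, st.2.1, st.2.2)

def add_link (content : String) (target : String) (position : String) (section_ : String) : String :=
  let link := "[[" ++ target ++ "]]"
  if position == "end" then
    PySem.Str.rstrip content ++ "\n\n" ++ link ++ "\n"
  else
    let section_header := "## " ++ section_
    if PySem.Str.isIn section_header content then
      let lines := pvSplitNL content
      let st := lines.foldl (pvStepA section_header link) ([], false, false)
      let result := if !st.2.2 then st.1 ++ ["\n- " ++ link] else st.1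
      PySem.Str.join "\n" result
    else
      PySem.Str.rstrip content ++ "\n\n" ++ section_header ++ "\n\n- " ++ link ++ "\n"

-- ===== PORT B =====
def add_link_alt (content : String) (target : String) (position : String) (section_ : String) : String :=
  let link := "[[" ++ target ++ "]]"
  if position == "end" then
    PySem.Str.rstrip content ++ "\n\n" ++ link ++ "\n"
  else
    let section_header := "## " ++ section_
    if !(PySem.Str.isIn section_header content) then
      PySem.Str.rstrip content ++ "\n\n" ++ section_header ++ "\n\n- " ++ link ++ "\n"
    else
      let lines := pvSplitNL content
      match lines.findIdx? (fun ln => PySem.Str.strip ln == section_header) with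
      | none => PySem.Str.join "\n" lines ++ "\n\n- " ++ link
      | some idx =>
        match (lines.drop (idx + 1)).findIdx?
            (fun ln => PySem.Str.strip ln == "" || PySem.Str.startswith ln "- ") with
        | none => PySem.Str.join "\n" lines ++ "\n\n- " ++ link
        | some off =>
          let j := idx + 1 + off
          PySem.Str.join "\n" (lines.take (j + 1) ++ ["- " ++ link] ++ lines.drop (j + 1))

-- ===== PRECONDITION & SPEC =====
def Spec_add_link (content : String) (target : String) (position : String) (section_ : String) (out : String) : Prop := out = add_link_alt content target position section_
instance (content : String) (target : String) (position : String) (section_ : String) (out : String) : Decidable (Spec_add_link content target position section_ out) := by unfold Spec_add_link; infer_instance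

-- ===== CLAIM (what is proved, stated in full; the proofs are below) =====
def Claim_equal_add_link : Prop := ∀ (content : String) (target : String) (position : String) (section_ : String), Dom_add_link content target position section_ → Spec_add_link content target position section_ (add_link content target position section_)

-- ===== LEMMAS AND PROOFS =====

-- split('\n') never yields the empty list of lines
lemma pv_splitOn_go_ne_nil (sep : List Char) (fuel : Nat) :
    ∀ (l cur : List Char) (acc : List (List Char)),
      PySem.Chars.splitOn.go sep fuel l cur acc ≠ [] := by
  induction fuel with
  | zero =>
    intro l cur acc
    rw [PySem.Chars.splitOn.go]
    simp
  | succ n ih =>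
    intro l cur acc
    cases l with
    | nil => rw [PySem.Chars.splitOn.go]; simp; omega
    | cons c rest =>
      rw [PySem.Chars.splitOn.go]
      by_cases hp : sep.isPrefixOf (c :: rest) = true
      · rw [if_pos hp]; exact ih _ _ _
      · rw [if_neg hp]; exact ih _ _ _

lemma pv_splitNL_ne_nil (content : String) : pvSplitNL content ≠ [] := by
  simp only [pvSplitNL, ne_eq, List.map_eq_nil_iff]
  exact pv_splitOn_go_ne_nil _ _ _ _ _

lemma pv_inter_snoc (sep y : List Char) :
    ∀ (l : List (List Char)), l ≠ [] →
      List.intercalate sep (l ++ [y]) = List.intercalate sep l ++ sep ++ y := by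
  intro l
  induction l with
  | nil => intro h; exact absurd rfl h
  | cons a t ih =>
    intro _
    cases t with
    | nil => simp [List.intercalate, List.intersperse]
    | cons b t2 =>
      have h1 : List.intercalate sep ((a :: b :: t2) ++ [y])
          = a ++ sep ++ List.intercalate sep ((b :: t2) ++ [y]) := by
        simp [List.intercalate, List.intersperse]
      rw [h1, ih (by simp)]
      have h2 : List.intercalate sep (a :: b :: t2)
          = a ++ sep ++ List.intercalate sep (b :: t2) := by
        simp [List.intercalate, List.intersperse]
      rw [h2]
      simp [List.append_assoc]

-- '\n'.join(xs + [y]) = '\n'.join(xs) + '\n' + y  (xs nonempty)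
lemma pv_join_snoc (xs : List String) (y : String) (hne : xs ≠ []) :
    PySem.Str.join "\n" (xs ++ [y]) = PySem.Str.join "\n" xs ++ "\n" ++ y := by
  rw [← String.toList_inj]
  simp only [String.toList_append, PySem.Str.toList_join, PySem.Chars.join, List.map_append,
    List.map_cons, List.map_nil]
  exact pv_inter_snoc _ _ _ (by simpa using hne)

lemma pv_tail_eq (s y : String) : s ++ "\n" ++ ("\n- " ++ y) = s ++ "\n\n- " ++ y := by
  rw [show ("\n\n- " : String) = "\n" ++ "\n- " from by decide]
  rw [String.append_assoc, String.append_assoc, String.append_assoc]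

-- a line whose strip() equals the section header is neither blank nor a "- " list item
lemma pv_header_not_stop (section_ ln : String)
    (h : (PySem.Str.strip ln == ("## " ++ section_)) = true) :
    (PySem.Str.strip ln == "" || PySem.Str.startswith ln "- ") = false := by
  have heq : PySem.Str.strip ln = "## " ++ section_ := by simpa using h
  have hlist : (PySem.Str.strip ln).toList = '#' :: '#' :: ' ' :: section_.toList := by
    rw [heq, String.toList_append]; rfl
  apply Bool.or_eq_false_iff.mpr
  constructor
  · apply beq_eq_false_iff_ne.mpr
    intro hx
    rw [hx] at hlist
    simp at hlist
  · by_cases hs : PySem.Str.startswith ln "- " = true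
    · exfalso
      have hpre : ('-' :: ' ' :: ([] : List Char)) <+: ln.toList := by
        have := hs
        simp only [PySem.Str.startswith, PySem.Chars.startswith] at this
        exact List.isPrefixOf_iff_prefix.mp this
      obtain ⟨rest, hrest⟩ := hpre
      have hstrip : (PySem.Str.strip ln).toList
          = PySem.Chars.rstrip (PySem.Chars.lstrip ln.toList) := by
        rw [PySem.Str.toList_strip]; rfl
      have hl : PySem.Chars.lstrip ln.toList = ln.toList := by
        rw [← hrest]
        rw [PySem.Chars.lstrip, List.cons_append, List.dropWhile_cons]
        rw [show PySem.Chars.isspace '-' = false from by decide]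
        simp
      have hsuf : PySem.Chars.rstrip ln.toList <+: ln.toList := by
        have h2 := (List.dropWhile_suffix (l := ln.toList.reverse) PySem.Chars.isspace).reverse
        rw [List.reverse_reverse] at h2
        exact h2
      rw [hstrip, hl] at hlist
      obtain ⟨t2, ht2⟩ := hlist ▸ hsuf
      rw [← hrest] at ht2
      simp at ht2
    · simpa using hs

-- once added = true the loop only copies lines
lemma pv_foldA_added (header link : String) (ls : List String) :
    ∀ (res : List String) (ins : Bool),
      (ls.foldl (pvStepA header link) (res, ins, true)).1 = res ++ ls ∧
      (ls.foldl (pvStepA header link) (res, ins, true)).2.2 = true := by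
  induction ls with
  | nil => intro res ins; simp
  | cons h t ih =>
    intro res ins
    simp only [List.foldl_cons, pvStepA, Bool.not_true, Bool.and_false, Bool.false_eq_true,
      if_false]
    by_cases h1 : (PySem.Str.strip h == header) = true
    · rw [if_pos h1]
      refine ⟨?_, (ih (res ++ [h]) true).2⟩
      rw [(ih (res ++ [h]) true).1]; simp
    · rw [if_neg h1]
      refine ⟨?_, (ih (res ++ [h]) ins).2⟩
      rw [(ih (res ++ [h]) ins).1]; simp

-- inside the section, before the insertion: the loop copies lines until the first
-- blank-or-"- " line, inserts right after it, and never inserts if there is none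
lemma pv_foldA_scan (header link : String) (ls : List String)
    (hd : ∀ ln : String, (PySem.Str.strip ln == header) = true →
      (PySem.Str.strip ln == "" || PySem.Str.startswith ln "- ") = false) :
    ∀ (res : List String),
      (ls.findIdx? (fun ln => PySem.Str.strip ln == "" || PySem.Str.startswith ln "- ") = none →
        ls.foldl (pvStepA header link) (res, true, false) = (res ++ ls, true, false)) ∧
      (∀ k, ls.findIdx? (fun ln => PySem.Str.strip ln == "" || PySem.Str.startswith ln "- ") = some k →
        (ls.foldl (pvStepA header link) (res, true, false)).1
          = res ++ ls.take (k + 1) ++ ["- " ++ link] ++ ls.drop (k + 1) ∧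
        (ls.foldl (pvStepA header link) (res, true, false)).2.2 = true) := by
  induction ls with
  | nil =>
    intro res
    refine ⟨fun _ => by simp, fun k hk => by simp at hk⟩
  | cons h t ih =>
    intro res
    by_cases hS : (PySem.Str.strip h == "" || PySem.Str.startswith h "- ") = true
    · have hP : (PySem.Str.strip h == header) = false := by
        by_cases hp : (PySem.Str.strip h == header) = true
        · rw [hd h hp] at hS; exact absurd hS (by simp)
        · simpa using hp
      have hstep : pvStepA header link (res, true, false) h
          = (res ++ [h] ++ ["- " ++ link], false, true) := by
        simp only [pvStepA]
        split_ifs <;> first | rfl | (exfalso; simp_all)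
      constructor
      · intro hnone
        rw [List.findIdx?_cons, hS] at hnone; simp at hnone
      · intro k hk
        rw [List.findIdx?_cons, hS] at hk
        simp only [if_true] at hk
        injection hk with hk0; subst hk0
        simp only [List.foldl_cons, hstep]
        refine ⟨?_, (pv_foldA_added header link t _ false).2⟩
        rw [(pv_foldA_added header link t _ false).1]
        simp
    · have hS' : (PySem.Str.strip h == "" || PySem.Str.startswith h "- ") = false := by
        simpa using hS
      have hstep : pvStepA header link (res, true, false) h = (res ++ [h], true, false) := by
        by_cases hp : (PySem.Str.strip h == header) = true
        · simp only [pvStepA]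
          split_ifs <;> rfl
        · simp only [pvStepA]
          split_ifs <;> rfl
      constructor
      · intro hnone
        rw [List.findIdx?_cons, hS'] at hnone
        simp only [Bool.false_eq_true, if_false, Option.map_eq_none_iff] at hnone
        simp only [List.foldl_cons, hstep]
        rw [(ih (res ++ [h])).1 hnone]
        simp
      · intro k hk
        rw [List.findIdx?_cons, hS'] at hk
        simp only [Bool.false_eq_true, if_false] at hk
        obtain ⟨k2, hk2, rfl⟩ := Option.map_eq_some_iff.mp hk
        simp only [List.foldl_cons, hstep]
        obtain ⟨e1, e2⟩ := ((ih (res ++ [h])).2 k2 hk2)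
        refine ⟨?_, e2⟩
        rw [e1]
        simp

-- before the header line: the loop copies lines and flips in_section at the first header line
lemma pv_foldA_seek (header link : String) (ls : List String) :
    ∀ (res : List String),
      (ls.findIdx? (fun ln => PySem.Str.strip ln == header) = none →
        ls.foldl (pvStepA header link) (res, false, false) = (res ++ ls, false, false)) ∧
      (∀ i, ls.findIdx? (fun ln => PySem.Str.strip ln == header) = some i →
        ls.foldl (pvStepA header link) (res, false, false)
          = (ls.drop (i + 1)).foldl (pvStepA header link) (res ++ ls.take (i + 1), true, false)) := by
  induction ls with
  | nil =>
    intro res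
    refine ⟨fun _ => by simp, fun i hi => by simp at hi⟩
  | cons h t ih =>
    intro res
    by_cases hP : (PySem.Str.strip h == header) = true
    · have hstep : pvStepA header link (res, false, false) h = (res ++ [h], true, false) := by
        simp only [pvStepA]
        split_ifs <;> rfl
      constructor
      · intro hnone
        rw [List.findIdx?_cons, hP] at hnone; simp at hnone
      · intro i hi
        rw [List.findIdx?_cons, hP] at hi
        simp only [if_true] at hi
        injection hi with hi0; subst hi0
        simp [List.foldl_cons, hstep]
    · have hP' : (PySem.Str.strip h == header) = false := by simpa using hP
      have hstep : pvStepA header link (res, false, false) h = (res ++ [h], false, false) := by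
        simp only [pvStepA]
        split_ifs <;> first | rfl | (exfalso; simp_all)
      constructor
      · intro hnone
        rw [List.findIdx?_cons, hP'] at hnone
        simp only [Bool.false_eq_true, if_false, Option.map_eq_none_iff] at hnone
        simp only [List.foldl_cons, hstep]
        rw [(ih (res ++ [h])).1 hnone]
        simp
      · intro i hi
        rw [List.findIdx?_cons, hP'] at hi
        simp only [Bool.false_eq_true, if_false] at hi
        obtain ⟨i2, hi2, rfl⟩ := Option.map_eq_some_iff.mp hi
        simp only [List.foldl_cons, hstep]
        rw [(ih (res ++ [h])).2 i2 hi2]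
        simp

-- the two existing-section computations agree
lemma pv_main (section_ link : String) (lines : List String) (hne : lines ≠ []) :
    (PySem.Str.join "\n"
      (if !(lines.foldl (pvStepA ("## " ++ section_) link) ([], false, false)).2.2 then
        (lines.foldl (pvStepA ("## " ++ section_) link) ([], false, false)).1 ++ ["\n- " ++ link]
      else (lines.foldl (pvStepA ("## " ++ section_) link) ([], false, false)).1))
    = (match lines.findIdx? (fun ln => PySem.Str.strip ln == ("## " ++ section_)) with
      | none => PySem.Str.join "\n" lines ++ "\n\n- " ++ link
      | some idx =>
        match (lines.drop (idx + 1)).findIdx?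
            (fun ln => PySem.Str.strip ln == "" || PySem.Str.startswith ln "- ") with
        | none => PySem.Str.join "\n" lines ++ "\n\n- " ++ link
        | some off =>
          PySem.Str.join "\n"
            (lines.take (idx + 1 + off + 1) ++ ["- " ++ link] ++ lines.drop (idx + 1 + off + 1))) := by
  have hd := pv_header_not_stop section_
  cases hI : lines.findIdx? (fun ln => PySem.Str.strip ln == ("## " ++ section_)) with
  | none =>
    rw [(pv_foldA_seek ("## " ++ section_) link lines []).1 hI]
    simp only [List.nil_append, Bool.not_false, if_true]
    rw [pv_join_snoc lines _ hne, pv_tail_eq]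
  | some idx =>
    rw [(pv_foldA_seek ("## " ++ section_) link lines []).2 idx hI]
    simp only []
    cases hK : (lines.drop (idx + 1)).findIdx?
        (fun ln => PySem.Str.strip ln == "" || PySem.Str.startswith ln "- ") with
    | none =>
      simp only []
      rw [(pv_foldA_scan ("## " ++ section_) link (lines.drop (idx + 1)) hd
        ([] ++ lines.take (idx + 1))).1 hK]
      simp only [List.nil_append, List.take_append_drop, Bool.not_false, if_true]
      rw [pv_join_snoc lines _ hne, pv_tail_eq]
    | some off =>
      simp only []
      obtain ⟨e1, e2⟩ := (pv_foldA_scan ("## " ++ section_) link (lines.drop (idx + 1)) hd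
        ([] ++ lines.take (idx + 1))).2 off hK
      rw [e1, e2]
      simp only [Bool.not_true, Bool.false_eq_true, if_false]
      have ht : lines.take (idx + 1 + off + 1)
          = lines.take (idx + 1) ++ (lines.drop (idx + 1)).take (off + 1) := by
        rw [show idx + 1 + off + 1 = (idx + 1) + (off + 1) from by omega, List.take_add]
      have hd2 : lines.drop (idx + 1 + off + 1) = (lines.drop (idx + 1)).drop (off + 1) := by
        rw [show idx + 1 + off + 1 = (idx + 1) + (off + 1) from by omega, ← List.drop_drop]
      rw [ht, hd2]
      simp [List.append_assoc]

-- ===== VERDICT (by name: the statement is the Claim_ definition above) =====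
theorem add_link_spec : Claim_equal_add_link := by
  unfold Claim_equal_add_link
  intro content target position section_ _
  unfold Spec_add_link
  simp only [add_link, add_link_alt]
  by_cases hpos : (position == "end") = true
  · rw [if_pos hpos, if_pos hpos]
  · rw [if_neg hpos, if_neg hpos]
    by_cases hin : PySem.Str.isIn ("## " ++ section_) content = true
    · rw [if_pos hin,
        if_neg (show ¬((!PySem.Str.isIn ("## " ++ section_) content) = true) from by
          rw [hin]; simp)]
      exact pv_main section_ ("[[" ++ target ++ "]]") (pvSplitNL content)
        (pv_splitNL_ne_nil content)
    · rw [if_neg hin,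
        if_pos (show (!PySem.Str.isIn ("## " ++ section_) content) = true from by
          rw [show PySem.Str.isIn ("## " ++ section_) content = false from by
            simpa using hin]; rfl)]
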